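-- pv_equiv track=rewrite | github.com/shelbyklein/targetvision | backend/ai_processor.py | extract_keywords_from_description
-- ===== SOURCE A (Python) =====
-- from typing import Dict, List, Optional, Tuple
--
-- def extract_keywords_from_description(description: str) -> List[str]:
--     """Extract potential keywords from AI description"""
--     # Simple keyword extraction - look for nouns and descriptive terms
--     common_words = {'the', 'a', 'an', 'and', 'or', 'but', 'in', 'on', 'at', 'to', 'for', 'of', 'with', 'by', 'is', 'are', 'was', 'were', 'this', 'that'}
--
--     # Split description into words and filter
--     words = description.lower().replace(',', '').replace('.', '').split()
--     keywords = []
--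
--     for word in words:
--         if len(word) > 3 and word not in common_words:
--             keywords.append(word)
--
--     # Return first 10 unique keywords
--     return list(dict.fromkeys(keywords))[:10]
-- ===== SOURCE B (Python) =====
-- def extract_keywords_from_description(description):
--     """Extract potential keywords from AI description (single streaming pass)."""
--     common_words = {'the', 'a', 'an', 'and', 'or', 'but', 'in', 'on', 'at', 'to', 'for', 'of', 'with', 'by', 'is', 'are', 'was', 'were', 'this', 'that'}
--     seen = set()
--     result = []
--     for word in description.lower().replace(',', '').replace('.', '').split():
--         if len(result) == 10:
--             break
--         if len(word) > 3 and word not in common_words and word not in seen: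
--             seen.add(word)
--             result.append(word)
--     return result
-- ===== Notes on version B (the rewrite author's own statement) =====
-- stated objective: alternative
-- what changed: B fuses A's three phases (filter loop, dict.fromkeys dedup, [:10] slice) into one streaming pass with a seen-set that stops as soon as 10 keywords are collected, never materialising the full filtered list.
import Mathlib
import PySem

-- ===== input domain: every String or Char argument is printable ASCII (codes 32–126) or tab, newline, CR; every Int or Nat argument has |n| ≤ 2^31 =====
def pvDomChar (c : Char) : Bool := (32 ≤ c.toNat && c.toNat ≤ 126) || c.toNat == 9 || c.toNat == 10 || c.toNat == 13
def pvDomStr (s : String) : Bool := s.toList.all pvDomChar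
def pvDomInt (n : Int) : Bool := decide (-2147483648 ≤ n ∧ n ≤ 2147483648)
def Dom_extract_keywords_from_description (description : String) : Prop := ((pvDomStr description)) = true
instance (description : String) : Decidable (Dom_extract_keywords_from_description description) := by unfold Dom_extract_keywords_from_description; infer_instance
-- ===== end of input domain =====

-- B fuses A's three phases (filter loop, dict.fromkeys dedup, [:10] slice) into one
-- streaming pass with a seen-set that stops once 10 keywords are collected (alternative decomposition).

-- ===== PORT A =====
def pvCommonWords : PySem.Set String :=
  PySem.Set.ofList ["the", "a", "an", "and", "or", "but", "in", "on", "at", "to", "for", "of", "with", "by", "is", "are", "was", "were", "this", "that"]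

def pvWords (description : String) : List String :=
  PySem.Str.split₀ (PySem.Str.replace (PySem.Str.replace (PySem.Str.lower description) "," "") "." "")

def extract_keywords_from_description (description : String) : List String :=
  let words := pvWords description
  let keywords := words.foldl
    (fun keywords word =>
      if 3 < PySem.Str.len word && !(pvCommonWords.contains word) then keywords ++ [word]
      else keywords) []
  PySem.List.slice (PySem.List.dedup keywords) none (some 10)

-- ===== PORT B =====
def pvKeepB (word : String) : Bool :=
  3 < PySem.Str.len word && !(pvCommonWords.contains word)

def pvLoopB (seen : PySem.Set String) (result : List String) : List String → List String
  | [] => result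
  | word :: rest =>
    if result.length == 10 then result
    else if pvKeepB word && !(seen.contains word) then
      pvLoopB (seen.add word) (result ++ [word]) rest
    else pvLoopB seen result rest

def extract_keywords_from_description_alt (description : String) : List String :=
  pvLoopB PySem.Set.empty [] (pvWords description)

-- ===== PRECONDITION & SPEC =====
def Spec_extract_keywords_from_description (description : String) (out : List String) : Prop := out = extract_keywords_from_description_alt description
instance (description : String) (out : List String) : Decidable (Spec_extract_keywords_from_description description out) := by unfold Spec_extract_keywords_from_description; infer_instance

-- ===== CLAIM (what is proved, stated in full; the proofs are below) =====
def Claim_equal_extract_keywords_from_description : Prop := ∀ (description : String), Dom_extract_keywords_from_description description → Spec_extract_keywords_from_description description (extract_keywords_from_description description)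

-- ===== LEMMAS AND PROOFS =====

-- ordered dedup relative to an already-seen set (proof-only reference function)
def pvDedupFrom (seen : PySem.Set String) : List String → List String
  | [] => []
  | w :: ws =>
    if seen.contains w then pvDedupFrom seen ws
    else w :: pvDedupFrom (seen.add w) ws

theorem pvUpdate_eq_append_dedupFrom (l : List String) (seen : PySem.Set String) :
    PySem.Set.update seen l = seen ++ pvDedupFrom seen l := by
  induction l generalizing seen with
  | nil => simp [pvDedupFrom, PySem.Set.update]
  | cons w ws ih =>
    by_cases hm : w ∈ seen
    · have h2 := ih seen
      simp only [PySem.Set.update, List.foldl_cons] at h2 ⊢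
      simp [pvDedupFrom, hm, h2]
    · have h2 := ih (seen ++ [w])
      simp only [PySem.Set.update, List.foldl_cons] at h2 ⊢
      simp [pvDedupFrom, hm, h2]

theorem pvDedup_eq_dedupFrom (l : List String) :
    PySem.List.dedup l = pvDedupFrom PySem.Set.empty l := by
  have h := pvUpdate_eq_append_dedupFrom l PySem.Set.empty
  simpa [PySem.Set.update, PySem.Set.empty, PySem.List.dedup_eq_ofList,
    PySem.Set.ofList_eq_foldl] using h

theorem pvFoldl_filter (l : List String) (acc : List String) :
    l.foldl
      (fun keywords word =>
        if 3 < PySem.Str.len word && !(pvCommonWords.contains word) then keywords ++ [word]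
        else keywords) acc
      = acc ++ l.filter pvKeepB := by
  induction l generalizing acc with
  | nil => simp
  | cons w ws ih =>
    rw [List.foldl_cons]
    have hrw : (if 3 < PySem.Str.len w && !(pvCommonWords.contains w) then acc ++ [w] else acc)
        = (if pvKeepB w then acc ++ [w] else acc) := rfl
    rw [hrw]
    by_cases h : pvKeepB w = true
    · rw [if_pos h, ih, List.filter_cons, if_pos h, List.append_assoc, List.singleton_append]
    · rw [if_neg h, ih, List.filter_cons, if_neg h]

theorem pvLoopB_spec (ws : List String) (seen : PySem.Set String) (res : List String)
    (hres : res.length ≤ 10) :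
    pvLoopB seen res ws = res ++ (pvDedupFrom seen (ws.filter pvKeepB)).take (10 - res.length) := by
  induction ws generalizing seen res with
  | nil => simp [pvLoopB, pvDedupFrom]
  | cons w ws ih =>
    by_cases hfull : res.length = 10
    · simp [pvLoopB, hfull]
    · have hlt : res.length < 10 := lt_of_le_of_ne hres hfull
      have hbe : (res.length == 10) = false := by simpa using hfull
      by_cases hkeep : pvKeepB w
      · by_cases hm : w ∈ seen
        · have hcond : (pvKeepB w && !(seen.contains w)) = false := by simp [hkeep, hm]
          simp [pvLoopB, hbe, hkeep, pvDedupFrom, hm, ih seen res hres]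
        · have hcond : (pvKeepB w && !(seen.contains w)) = true := by simp [hkeep, hm]
          have hlen : (res ++ [w]).length ≤ 10 := by simp; omega
          rw [pvLoopB, hbe]
          simp only [Bool.false_eq_true, if_false, hcond, if_true]
          rw [ih (seen.add w) (res ++ [w]) hlen]
          have htake : 10 - res.length = (10 - (res ++ [w]).length) + 1 := by simp; omega
          simp [hkeep, pvDedupFrom, hm, htake, List.append_assoc]
      · simp [pvLoopB, hbe, hkeep, ih seen res hres]

-- ===== VERDICT (by name: the statement is the Claim_ definition above) =====
theorem extract_keywords_from_description_spec : Claim_equal_extract_keywords_from_description := by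
  intro description _
  unfold Spec_extract_keywords_from_description
  unfold extract_keywords_from_description extract_keywords_from_description_alt
  simp only
  rw [pvFoldl_filter (pvWords description) []]
  rw [show ((10 : Int) = ((10 : Nat) : Int)) from rfl, PySem.List.slice_to_natCast]
  rw [pvDedup_eq_dedupFrom]
  rw [pvLoopB_spec (pvWords description) PySem.Set.empty [] (by simp)]
  simp
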